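-- pv_equiv track=rewrite | github.com/ah2727/mana-agent | src/mana_analyzer/services/structure_service.py | render_file_tree_markdown
-- ===== SOURCE A (Python) =====
-- from typing import Any, Iterable
--
-- def render_file_tree_markdown(files: list[str]) -> str:
--     tree: dict[str, Any] = {}
--     for p in files:
--         parts = [x for x in p.replace("\\", "/").split("/") if x]
--         cur = tree
--         for part in parts[:-1]:
--             cur = cur.setdefault(part + "/", {})
--         cur.setdefault(parts[-1], None)
--
--     lines: list[str] = ["```text"]
--
--     def walk(node: dict[str, Any], prefix: str = "") -> None:
--         keys = sorted(node.keys(), key=lambda k: (0 if k.endswith("/") else 1, k))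
--         for i, k in enumerate(keys):
--             last = i == len(keys) - 1
--             branch = "└── " if last else "├── "
--             lines.append(prefix + branch + k.rstrip("/"))
--             child = node[k]
--             if isinstance(child, dict):
--                 ext = "    " if last else "│   "
--                 walk(child, prefix + ext)
--
--     walk(tree)
--     lines.append("```")
--     return "\n".join(lines)
-- ===== SOURCE B (Python) =====
-- def render_file_tree_markdown(files: list[str]) -> str:
--     # B never builds A's nested trie: each path becomes its key list once, and rendering
--     # recursively partitions the current group of key lists by head key (one bucket pass per level).
--     def norm(p):
--         parts = [x for x in p.replace("\\", "/").split("/") if x]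
--         return [part + "/" for part in parts[:-1]] + [parts[-1]]
--
--     def emit(paths, prefix):
--         buckets = {}
--         for q in paths:
--             buckets.setdefault(q[0], []).append(q[1:])
--         heads = sorted(buckets, key=lambda k: (0 if k.endswith("/") else 1, k))
--         out = []
--         for i, k in enumerate(heads):
--             last = i == len(heads) - 1
--             out.append(prefix + ("└── " if last else "├── ") + k.rstrip("/"))
--             tails = [t for t in buckets[k] if t]
--             if tails:
--                 out += emit(tails, prefix + ("    " if last else "│   "))
--         return out
--
--     key_lists = [norm(p) for p in files]
--     return "\n".join(["```text"] + emit(key_lists, "") + ["```"])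
-- ===== Notes on version B (the rewrite author's own statement) =====
-- stated objective: alternative
-- what changed: B never builds A's nested-dict trie: it converts each path to its key list once, then renders by recursively partitioning the current group of key lists with one flat bucket pass per level (sorted distinct head keys, recursion on the non-empty tails of each bucket) instead of A's trie construction followed by a recursive walk of the nested dicts.
import Mathlib
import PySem

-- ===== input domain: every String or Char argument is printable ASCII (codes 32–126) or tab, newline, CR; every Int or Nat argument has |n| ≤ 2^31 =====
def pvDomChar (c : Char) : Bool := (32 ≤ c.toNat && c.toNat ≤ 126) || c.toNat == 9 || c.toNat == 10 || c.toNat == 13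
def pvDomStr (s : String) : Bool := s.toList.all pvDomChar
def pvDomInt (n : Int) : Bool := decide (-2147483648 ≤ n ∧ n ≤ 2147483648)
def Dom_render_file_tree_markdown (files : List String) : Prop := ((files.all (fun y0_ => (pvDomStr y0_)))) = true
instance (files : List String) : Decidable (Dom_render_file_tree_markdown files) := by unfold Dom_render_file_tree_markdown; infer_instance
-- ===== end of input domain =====

-- B drops A's nested-dict trie entirely: it maps every path to its key list once and
-- renders by recursively partitioning the list of key lists by sorted distinct head key.
-- Objective: alternative — same output, same cost, different data structure.

-- ===== PORT A =====
-- The nested dict[str, Any] (value = sub-dict or None) as a mutual pair (no nested inductive):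
mutual
inductive PvNode where
  | file : PvNode
  | dir  : PvEntries → PvNode
inductive PvEntries where
  | nil  : PvEntries
  | cons : String → PvNode → PvEntries → PvEntries
end

mutual
def pvSizeN : PvNode → Nat
  | .file => 0
  | .dir d => pvSizeE d + 1
def pvSizeE : PvEntries → Nat
  | .nil => 0
  | .cons _ n e => pvSizeN n + 1 + pvSizeE e
end

-- dict.items() of a node, in insertion order
def pvToPairs : PvEntries → List (String × PvNode)
  | .nil => []
  | .cons k n e => (k, n) :: pvToPairs e

-- parts = [x for x in p.replace("\\", "/").split("/") if x]
def pvParts (p : String) : List String :=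
  ((PySem.Str.split? (PySem.Str.replace p "\\" "/") "/").getD []).filter (fun x => x ≠ "")

-- cur.setdefault(parts[-1], None): insert the file key at the end if absent
def pvSetdefaultFile (k : String) : PvEntries → PvEntries
  | .nil => .cons k .file .nil
  | .cons k' n e => if k' = k then .cons k' n e else .cons k' n (pvSetdefaultFile k e)

-- cur = cur.setdefault(part + "/", {}) followed by the rest of the mutating loop:
-- update (creating if absent) the dir entry at `key`, applying `f` to its sub-entries.
-- (a key ending in "/" is only ever inserted with a dict value, so the .file arm is unreachable
-- on trees this file builds; Python would raise AttributeError there)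
def pvModifyDir (es : PvEntries) (key : String) (f : PvEntries → PvEntries) : PvEntries :=
  match es with
  | .nil => .cons key (.dir (f .nil)) .nil
  | .cons k n e =>
    if k = key then
      match n with
      | .dir d => .cons k (.dir (f d)) e
      | .file => .cons k n e
    else .cons k n (pvModifyDir e key f)

-- the per-path body of the building loop (empty parts: Python raises IndexError; excluded by Pre_)
def pvInsertPath : List String → PvEntries → PvEntries
  | [], es => es
  | [last], es => pvSetdefaultFile last es
  | part :: rest, es => pvModifyDir es (part ++ "/") (fun d => pvInsertPath rest d)

def pvBuildTree (files : List String) : PvEntries :=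
  files.foldl (fun t p => pvInsertPath (pvParts p) t) .nil

-- k.rstrip("/"): drop trailing '/' characters (hand port, exact for this one-char strip set)
def pvRstripSlash (s : String) : String :=
  String.ofList ((s.toList.reverse.dropWhile (fun c => c = '/')).reverse)

-- sorted(node.keys(), key=lambda k: (0 if k.endswith("/") else 1, k)) followed by node[k]:
-- keys of a dict are distinct, so sorting the (key, child) items by the same key is the same list
def pvSortedPairs (es : PvEntries) : List (String × PvNode) :=
  PySem.List.sorted2 (pvToPairs es)
    (fun kv => if PySem.Str.endswith kv.1 "/" then (0 : Int) else 1) (fun kv => kv.1)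

-- measure for termination of the walk
def pvWeighP (kc : String × PvNode) : Nat := pvSizeN kc.2 + 1
def pvMuP (l : List (String × PvNode)) : Nat := (l.map pvWeighP).sum

theorem pvMuP_toPairs : ∀ (es : PvEntries), pvMuP (pvToPairs es) = pvSizeE es
  | .nil => rfl
  | .cons _ n e => by
    have ih := pvMuP_toPairs e
    simp [pvToPairs, pvMuP, pvWeighP, pvSizeE] at ih ⊢; omega

theorem pvMuP_sortedPairs (es : PvEntries) : pvMuP (pvSortedPairs es) = pvSizeE es := by
  rw [← pvMuP_toPairs]
  unfold pvMuP
  exact List.Perm.sum_eq (List.Perm.map _ (PySem.List.sorted2_perm _ _ _ _))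

-- the recursive walk over the sorted items; `rest.isEmpty` is `i == len(keys)-1`
def pvWalkA : List (String × PvNode) → String → List String
  | [], _ => []
  | (k, c) :: rest, pfx =>
    let last := rest.isEmpty
    let line := pfx ++ (if last then "└── " else "├── ") ++ pvRstripSlash k
    line ::
      (match c with
       | .dir d =>
         pvWalkA (pvSortedPairs d) (pfx ++ (if last then "    " else "│   ")) ++ pvWalkA rest pfx
       | .file => pvWalkA rest pfx)
termination_by l _ => pvMuP l
decreasing_by
  all_goals (try rw [pvMuP_sortedPairs])
  all_goals simp [pvMuP, pvWeighP, pvSizeN] <;> omega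

def render_file_tree_markdown (files : List String) : String :=
  let tree := pvBuildTree files
  let lines := "```text" :: (pvWalkA (pvSortedPairs tree) "" ++ ["```"])
  PySem.Str.join "\n" lines

-- ===== PORT B =====
-- norm(p): the key list of one path; parts[-1] of empty parts raises in Python (outside Pre_),
-- the port returns [] there
def pvNorm (p : String) : List String :=
  let parts := pvParts p
  match parts.getLast? with
  | some l => parts.dropLast.map (fun x => x ++ "/") ++ [l]
  | none => []

-- buckets = {}; for q in paths: buckets.setdefault(q[0], []).append(q[1:])
-- (q[0] of an empty key list would raise in Python — unreachable under Pre_ — so it is skipped)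
def pvHeadTail (q : List String) : Option (String × List String) :=
  match q with
  | x :: rest => some (x, rest)
  | [] => none

def pvBuckets (paths : List (List String)) : PySem.Dict String (List (List String)) :=
  (paths.filterMap pvHeadTail).foldl
    (fun d p => d.modify p.1 [] (fun l => l ++ [p.2])) PySem.Dict.empty

-- heads = sorted(buckets, key=lambda k: (0 if k.endswith("/") else 1, k))
def pvHeads (paths : List (List String)) : List String :=
  PySem.List.sorted2 (pvBuckets paths).keys
    (fun k => if PySem.Str.endswith k "/" then (0 : Int) else 1) (fun k => k)

-- tails = [t for t in buckets[k] if t]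
def pvTailsB (paths : List (List String)) (k : String) : List (List String) :=
  ((pvBuckets paths).getD k []).filter (fun t => !t.isEmpty)

-- proof-side characterization of one filtered bucket (used for the termination lemma below)
def pvTails (paths : List (List String)) (k : String) : List (List String) :=
  paths.filterMap (fun q =>
    match q with
    | x :: y :: r => if x = k then some (y :: r) else none
    | _ => none)

theorem pvTails_nil_q (rest : List (List String)) (k : String) :
    pvTails ([] :: rest) k = pvTails rest k := by
  simp [pvTails]

theorem pvTails_single (x : String) (rest : List (List String)) (k : String) :
    pvTails ([x] :: rest) k = pvTails rest k := by
  simp [pvTails]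

theorem pvTails_cons2 (x y : String) (r : List String) (rest : List (List String)) (k : String) :
    pvTails ((x :: y :: r) :: rest) k = (if x = k then [y :: r] else []) ++ pvTails rest k := by
  by_cases hx : x = k <;> simp [pvTails, hx]

theorem pvTailsB_eq (paths : List (List String)) (k : String) :
    pvTailsB paths k = pvTails paths k := by
  unfold pvTailsB pvBuckets
  rw [PySem.Dict.getD_foldl_modify_append, PySem.Dict.getD_empty, List.nil_append]
  induction paths with
  | nil => rfl
  | cons q rest ih =>
    rcases q with _ | ⟨x, _ | ⟨y, r⟩⟩
    · rw [pvTails_nil_q, ← ih]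
      rfl
    · rw [pvTails_single, ← ih]
      by_cases hx : x = k <;> simp [pvHeadTail, hx]
    · rw [pvTails_cons2, ← ih]
      by_cases hx : x = k <;> simp [pvHeadTail, hx]

def pvSumLen (L : List (List String)) : Nat := (L.map List.length).sum

-- termination of the partition recursion: every kept tail is a strictly shorter suffix
theorem pvSumLen_tails_le (k : String) :
    ∀ (l : List (List String)), pvSumLen (pvTails l k) ≤ pvSumLen l := by
  intro l
  induction l with
  | nil => simp [pvTails, pvSumLen]
  | cons a t ih =>
    rcases a with _ | ⟨x, _ | ⟨y, r⟩⟩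
    · simp [pvTails, pvSumLen] at ih ⊢; omega
    · simp [pvTails, pvSumLen] at ih ⊢; omega
    · by_cases hx : x = k
      · simp [pvTails, pvSumLen, hx] at ih ⊢; omega
      · simp [pvTails, pvSumLen, hx] at ih ⊢; omega

theorem pvSumLen_tails_lt (paths : List (List String)) (k : String) :
    pvTails paths k ≠ [] → pvSumLen (pvTails paths k) < pvSumLen paths := by
  induction paths with
  | nil => simp [pvTails]
  | cons a t ih =>
    rcases a with _ | ⟨x, _ | ⟨y, r⟩⟩
    · intro h
      have h' : pvTails t k ≠ [] := by simpa [pvTails] using h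
      have := ih h'
      simp [pvTails, pvSumLen] at this ⊢; omega
    · intro h
      have h' : pvTails t k ≠ [] := by simpa [pvTails] using h
      have := ih h'
      simp [pvTails, pvSumLen] at this ⊢; omega
    · by_cases hx : x = k
      · intro _
        have := pvSumLen_tails_le k t
        simp [pvTails, pvSumLen, hx] at this ⊢; omega
      · intro h
        have h' : pvTails t k ≠ [] := by simpa [pvTails, hx] using h
        have := ih h'
        simp [pvTails, pvSumLen, hx] at this ⊢; omega

theorem pvSumLen_tailsB_lt (paths : List (List String)) (k : String) :
    pvTailsB paths k ≠ [] → pvSumLen (pvTailsB paths k) < pvSumLen paths := by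
  rw [pvTailsB_eq]
  exact pvSumLen_tails_lt paths k

-- the loop `for i, k in enumerate(heads)` as recursion over the remaining heads
def pvEmit : List (List String) → List String → String → List String
  | _, [], _ => []
  | paths, k :: hs, pfx =>
    let last := hs.isEmpty
    let line := pfx ++ (if last then "└── " else "├── ") ++ pvRstripSlash k
    let tails := pvTailsB paths k
    line ::
      ((if h : tails.isEmpty then []
        else pvEmit tails (pvHeads tails) (pfx ++ (if last then "    " else "│   "))) ++
       pvEmit paths hs pfx)
termination_by paths hs _ => (pvSumLen paths, hs.length)
decreasing_by
  · exact Prod.Lex.left _ _ (pvSumLen_tailsB_lt _ _ (by simpa using h))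
  · exact Prod.Lex.right _ (by simp)

def render_file_tree_markdown_alt (files : List String) : String :=
  let key_lists := files.map pvNorm
  PySem.Str.join "\n" ("```text" :: (pvEmit key_lists (pvHeads key_lists) "" ++ ["```"]))

-- ===== PRECONDITION & SPEC =====
-- Pre_ excludes exactly the inputs on which Python A raises IndexError (parts[-1] of an empty
-- list): a path made only of '/' and '\' separators (including the empty string); B raises there too.
def Pre_render_file_tree_markdown (files : List String) : Prop :=
  ∀ p ∈ files, p.toList.any (fun c => c ≠ '/' && c ≠ '\\') = true
instance (files : List String) : Decidable (Pre_render_file_tree_markdown files) := by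
  unfold Pre_render_file_tree_markdown; infer_instance

def pvWitness_render_file_tree_markdown : List String := ["src/a.py", "src/b/c.txt", "README.md"]

def Spec_render_file_tree_markdown (files : List String) (out : String) : Prop := out = render_file_tree_markdown_alt files
instance (files : List String) (out : String) : Decidable (Spec_render_file_tree_markdown files out) := by unfold Spec_render_file_tree_markdown; infer_instance

-- ===== CLAIM (what is proved, stated in full; the proofs are below) =====
def Claim_equal_render_file_tree_markdown : Prop := ∀ (files : List String), Dom_render_file_tree_markdown files → Pre_render_file_tree_markdown files → Spec_render_file_tree_markdown files (render_file_tree_markdown files)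

-- ===== LEMMAS AND PROOFS =====

-- keys and first-match lookup of a node
def pvKeys (es : PvEntries) : List String := (pvToPairs es).map Prod.fst

def pvLookup : PvEntries → String → Option PvNode
  | .nil, _ => none
  | .cons k n e, key => if k = key then some n else pvLookup e key

-- the key list a given parts list contributes to the tree
def pvKeysOfParts : List String → List String
  | [] => []
  | [l] => [l]
  | p :: rest => (p ++ "/") :: pvKeysOfParts rest

-- file keys (parts) contain no '/', recursively
def pvWfD : PvEntries → Prop
  | .nil => True
  | .cons k n e =>
    (n = .file → ('/' : Char) ∉ k.toList) ∧
    (match n with | .file => True | .dir d => pvWfD d) ∧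
    pvWfD e

-- "es is the trie of the key-list collection L" — everything pvEmit consults about L
-- matches everything pvWalkA consults about es
inductive PvRep : List (List String) → PvEntries → Prop where
  | mk : ∀ (L : List (List String)) (es : PvEntries),
      (∀ k, k ∈ pvKeys es ↔ k ∈ L.filterMap List.head?) →
      (pvKeys es).Nodup →
      (∀ k, pvLookup es k = some .file → pvTails L k = []) →
      (∀ k d, pvLookup es k = some (.dir d) → pvTails L k ≠ []) →
      (∀ k d, pvLookup es k = some (.dir d) → PvRep (pvTails L k) d) →
      PvRep L es

theorem sorted2_eq_sorted_lex {α : Type} (xs : List α) (k1 : α → Int) (k2 : α → String) :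
    PySem.List.sorted2 xs k1 k2 = PySem.List.sorted xs (fun x => toLex (k1 x, k2 x)) := by
  have hb : (fun a b : α => decide (k1 a < k1 b) || (!decide (k1 b < k1 a) && decide (k2 a < k2 b)))
      = (fun a b : α => decide ((fun x => toLex (k1 x, k2 x)) a < (fun x => toLex (k1 x, k2 x)) b)) := by
    funext a b
    by_cases h1 : k1 a < k1 b
    · simp [h1, Prod.Lex.lt_iff]
    · by_cases h2 : k1 b < k1 a
      · have hne : ¬ k1 a = k1 b := by omega
        simp [h1, h2, Prod.Lex.lt_iff, hne]
      · have he : k1 a = k1 b := le_antisymm (not_lt.mp h2) (not_lt.mp h1)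
        by_cases h3 : k2 a < k2 b
        · simp [h3, Prod.Lex.lt_iff, he]
        · simp [h3, Prod.Lex.lt_iff, he]
  rw [PySem.List.sorted_eq_foldl_insertBy]
  simp only [PySem.List.sorted2]
  rw [hb]
  simp

theorem pvLookup_setdefault (l k : String) : ∀ (es : PvEntries),
    pvLookup (pvSetdefaultFile l es) k =
      if k = l then some ((pvLookup es l).getD .file) else pvLookup es k
  | .nil => by
    by_cases h : k = l
    · simp [pvSetdefaultFile, pvLookup, h]
    · simp [pvSetdefaultFile, pvLookup, h, Ne.symm h]
  | .cons k' n e => by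
    have ih := pvLookup_setdefault l k e
    by_cases h1 : k' = l
    · subst h1
      by_cases h2 : k = k'
      · simp [pvSetdefaultFile, pvLookup, h2]
      · simp [pvSetdefaultFile, pvLookup, h2, Ne.symm h2]
    · by_cases h2 : k' = k
      · subst h2
        have hkl : ¬ k' = l := h1
        simp [pvSetdefaultFile, pvLookup, h1, hkl]
      · simp [pvSetdefaultFile, pvLookup, h1, h2, ih]

theorem pvKeys_setdefault (l : String) : ∀ (es : PvEntries),
    pvKeys (pvSetdefaultFile l es) =
      if l ∈ pvKeys es then pvKeys es else pvKeys es ++ [l]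
  | .nil => by simp [pvSetdefaultFile, pvKeys, pvToPairs]
  | .cons k' n e => by
    have ih := pvKeys_setdefault l e
    by_cases h1 : k' = l
    · subst h1
      simp [pvSetdefaultFile, pvKeys, pvToPairs]
    · simp only [pvSetdefaultFile, if_neg h1]
      have hck : pvKeys (PvEntries.cons k' n (pvSetdefaultFile l e)) =
          k' :: pvKeys (pvSetdefaultFile l e) := rfl
      have hck2 : pvKeys (PvEntries.cons k' n e) = k' :: pvKeys e := rfl
      rw [hck, ih, hck2]
      by_cases h2 : l ∈ pvKeys e
      · simp [h2]
      · simp [h2, Ne.symm h1]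

theorem pvLookup_modifyDir (key k : String) (f : PvEntries → PvEntries) : ∀ (es : PvEntries),
    pvLookup (pvModifyDir es key f) k =
      if k = key then
        (match pvLookup es key with
         | none => some (.dir (f .nil))
         | some (.dir d) => some (.dir (f d))
         | some .file => some .file)
      else pvLookup es k
  | .nil => by
    by_cases h : k = key
    · simp [pvModifyDir, pvLookup, h]
    · simp [pvModifyDir, pvLookup, h, Ne.symm h]
  | .cons k' n e => by
    have ih := pvLookup_modifyDir key k f e
    by_cases h1 : k' = key
    · subst h1
      cases n with
      | file =>
        by_cases h2 : k = k'
        · simp [pvModifyDir, pvLookup, h2]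
        · simp [pvModifyDir, pvLookup, h2, Ne.symm h2]
      | dir d =>
        by_cases h2 : k = k'
        · simp [pvModifyDir, pvLookup, h2]
        · simp [pvModifyDir, pvLookup, h2, Ne.symm h2]
    · by_cases h2 : k' = k
      · subst h2
        have : ¬ k' = key := h1
        simp [pvModifyDir, pvLookup, h1, this]
      · simp [pvModifyDir, pvLookup, h1, h2, ih]

theorem pvKeys_modifyDir (key : String) (f : PvEntries → PvEntries) : ∀ (es : PvEntries),
    pvKeys (pvModifyDir es key f) =
      if key ∈ pvKeys es then pvKeys es else pvKeys es ++ [key]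
  | .nil => by simp [pvModifyDir, pvKeys, pvToPairs]
  | .cons k' n e => by
    have ih := pvKeys_modifyDir key f e
    by_cases h1 : k' = key
    · subst h1
      cases n <;> simp [pvModifyDir, pvKeys, pvToPairs]
    · simp only [pvModifyDir, if_neg h1]
      have hck : pvKeys (PvEntries.cons k' n (pvModifyDir e key f)) =
          k' :: pvKeys (pvModifyDir e key f) := rfl
      have hck2 : pvKeys (PvEntries.cons k' n e) = k' :: pvKeys e := rfl
      rw [hck, ih, hck2]
      by_cases h2 : key ∈ pvKeys e
      · simp [h2]
      · simp [h2, Ne.symm h1]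

theorem pvLookup_eq_none_iff (k : String) : ∀ (es : PvEntries),
    pvLookup es k = none ↔ k ∉ pvKeys es
  | .nil => by simp [pvLookup, pvKeys, pvToPairs]
  | .cons k' n e => by
    have ih := pvLookup_eq_none_iff k e
    by_cases h : k' = k
    · simp [pvLookup, pvKeys, pvToPairs, h]
    · simp [pvLookup, pvKeys, pvToPairs, h, Ne.symm h, ih]

theorem pvLookup_of_mem_pairs (k : String) (n : PvNode) : ∀ (es : PvEntries),
    (k, n) ∈ pvToPairs es → (pvKeys es).Nodup → pvLookup es k = some n
  | .nil, hmem, _ => by simp [pvToPairs] at hmem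
  | .cons k' n' e, hmem, hnd => by
    have ih := pvLookup_of_mem_pairs k n e
    simp only [pvToPairs, List.mem_cons] at hmem
    simp only [pvKeys, pvToPairs, List.map_cons, List.nodup_cons] at hnd
    rcases hmem with h | h
    · have e1 : k = k' := congrArg Prod.fst h
      have e2 : n = n' := congrArg Prod.snd h
      subst e1; subst e2
      simp [pvLookup]
    · by_cases hk : k' = k
      · subst hk
        exact absurd (List.mem_map.mpr ⟨(k', n), h, rfl⟩) hnd.1
      · simpa [pvLookup, hk] using ih h hnd.2

theorem pvSize_lookup_dir (k : String) (d : PvEntries) : ∀ (es : PvEntries),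
    pvLookup es k = some (.dir d) → pvSizeE d < pvSizeE es
  | .nil, h => by simp [pvLookup] at h
  | .cons k' n e, h => by
    by_cases hk : k' = k
    · subst hk
      have h2 : n = PvNode.dir d := by simpa [pvLookup] using h
      subst h2
      simp only [pvSizeE, pvSizeN]
      omega
    · have := pvSize_lookup_dir k d e (by simpa [pvLookup, hk] using h)
      simp [pvSizeE]
      omega

theorem pvTails_append (L1 L2 : List (List String)) (k : String) :
    pvTails (L1 ++ L2) k = pvTails L1 k ++ pvTails L2 k := by
  simp [pvTails]

theorem pvTails_eq_nil_of_not_head (L : List (List String)) (k : String)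
    (h : k ∉ L.filterMap List.head?) : pvTails L k = [] := by
  induction L with
  | nil => simp [pvTails]
  | cons q rest ih =>
    rcases q with _ | ⟨x, _ | ⟨y, r⟩⟩
    · rw [pvTails_nil_q]
      exact ih (by simpa using h)
    · rw [pvTails_single]
      simp only [List.filterMap_cons, List.head?] at h
      exact ih (fun hm => h (List.mem_cons_of_mem _ hm))
    · simp only [List.filterMap_cons, List.head?] at h
      have hx : ¬ x = k := fun e => h (e ▸ List.mem_cons_self ..)
      rw [pvTails_cons2, if_neg hx, List.nil_append]
      exact ih (fun hm => h (List.mem_cons_of_mem _ hm))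

theorem pvWfD_nil : pvWfD .nil := by simp [pvWfD]

theorem pvWfD_cons (k : String) (n : PvNode) (e : PvEntries) :
    pvWfD (.cons k n e) ↔
      ((n = .file → ('/' : Char) ∉ k.toList) ∧ (∀ d, n = .dir d → pvWfD d) ∧ pvWfD e) := by
  cases n <;> simp [pvWfD]

theorem pvWf_lookup (k : String) (n : PvNode) : ∀ (es : PvEntries),
    pvWfD es → pvLookup es k = some n →
    (n = .file → ('/' : Char) ∉ k.toList) ∧ (∀ d, n = .dir d → pvWfD d)
  | .nil, _, h => by simp [pvLookup] at h
  | .cons k' n' e, hwf, h => by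
    rw [pvWfD_cons] at hwf
    obtain ⟨h1, h2, h3⟩ := hwf
    by_cases hk : k' = k
    · subst hk
      have h4 : n' = n := by simpa [pvLookup] using h
      subst h4
      exact ⟨h1, h2⟩
    · exact pvWf_lookup k n e h3 (by simpa [pvLookup, hk] using h)

theorem pvWf_setdefault (l : String) (hl : ('/' : Char) ∉ l.toList) : ∀ (es : PvEntries),
    pvWfD es → pvWfD (pvSetdefaultFile l es)
  | .nil, _ => by
    show pvWfD (.cons l .file .nil)
    rw [pvWfD_cons]
    refine ⟨fun _ => hl, ?_, pvWfD_nil⟩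
    intro d hd
    exact nomatch hd
  | .cons k' n e, hwf => by
    rw [pvWfD_cons] at hwf
    obtain ⟨h1, h2, h3⟩ := hwf
    by_cases hk : k' = l
    · simp only [pvSetdefaultFile, if_pos hk]
      rw [pvWfD_cons]
      exact ⟨h1, h2, h3⟩
    · simp only [pvSetdefaultFile, if_neg hk]
      rw [pvWfD_cons]
      exact ⟨h1, h2, pvWf_setdefault l hl e h3⟩

theorem pvWf_modifyDir (key : String) (f : PvEntries → PvEntries)
    (hf : ∀ d, pvWfD d → pvWfD (f d)) : ∀ (es : PvEntries),
    pvWfD es → pvWfD (pvModifyDir es key f)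
  | .nil, _ => by
    show pvWfD (.cons key (.dir (f .nil)) .nil)
    rw [pvWfD_cons]
    refine ⟨?_, ?_, pvWfD_nil⟩
    · intro h
      exact nomatch h
    · intro d' hd'
      injection hd' with h'
      exact h' ▸ hf .nil pvWfD_nil
  | .cons k' n e, hwf => by
    rw [pvWfD_cons] at hwf
    obtain ⟨h1, h2, h3⟩ := hwf
    by_cases hk : k' = key
    · cases n with
      | file =>
        simp only [pvModifyDir, if_pos hk]
        rw [pvWfD_cons]
        exact ⟨h1, h2, h3⟩
      | dir d =>
        simp only [pvModifyDir, if_pos hk]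
        rw [pvWfD_cons]
        refine ⟨?_, ?_, h3⟩
        · intro h
          exact nomatch h
        · intro d' hd'
          injection hd' with h'
          exact h' ▸ hf d (h2 d rfl)
    · simp only [pvModifyDir, if_neg hk]
      rw [pvWfD_cons]
      exact ⟨h1, h2, pvWf_modifyDir key f hf e h3⟩

theorem pvWf_insertPath : ∀ (parts : List String) (es : PvEntries),
    (∀ x ∈ parts, ('/' : Char) ∉ x.toList) → pvWfD es → pvWfD (pvInsertPath parts es)
  | [], es, _, hwf => hwf
  | [l], es, hs, hwf => pvWf_setdefault l (hs l (by simp)) es hwf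

  | p :: q :: r, es, hs, hwf =>
    pvWf_modifyDir (p ++ "/") _
      (fun d hd => pvWf_insertPath (q :: r) d (fun x hx => hs x (List.mem_cons_of_mem _ hx)) hd)
      es hwf

theorem splitOn_go_no_slash : ∀ (fuel : Nat) (l cur : List Char) (acc : List (List Char)),
    l.length < fuel → (∀ a ∈ acc, ('/' : Char) ∉ a) → (('/' : Char) ∉ cur) →
    ∀ x ∈ PySem.Chars.splitOn.go ['/'] fuel l cur acc, ('/' : Char) ∉ x := by
  intro fuel
  induction fuel with
  | zero => intro l cur acc h; exact absurd h (by omega)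
  | succ fuel ih =>
    intro l cur acc hlen hacc hcur x hx
    cases l with
    | nil =>
      rw [PySem.Chars.splitOn.go.eq_def] at hx
      simp only [List.mem_reverse, List.mem_cons] at hx
      rcases hx with h | h
      · subst h; simpa using hcur
      · exact hacc x h
    | cons c rest =>
      rw [show PySem.Chars.splitOn.go ['/'] (fuel+1) (c :: rest) cur acc =
            if ['/'].isPrefixOf (c :: rest) then
              PySem.Chars.splitOn.go ['/'] fuel (List.drop 1 (c :: rest)) [] (cur.reverse :: acc)
            else PySem.Chars.splitOn.go ['/'] fuel rest (c :: cur) acc from rfl] at hx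
      by_cases hc : c = '/'
      · rw [if_pos (by simp [List.isPrefixOf, hc])] at hx
        refine ih rest [] (cur.reverse :: acc) (by simpa using hlen) ?_ (by simp) x (by simpa using hx)
        intro a ha
        rcases List.mem_cons.mp ha with h | h
        · subst h; simpa using hcur
        · exact hacc a h
      · rw [if_neg (by simp [List.isPrefixOf, Ne.symm hc])] at hx
        refine ih rest (c :: cur) acc (by simpa using hlen) hacc ?_ x hx
        intro hmem
        rcases List.mem_cons.mp hmem with h | h
        · exact hc h.symm
        · exact hcur h

theorem splitOn_no_slash (cs : List Char) :
    ∀ x ∈ PySem.Chars.splitOn cs ['/'], ('/' : Char) ∉ x := by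
  intro x hx
  exact splitOn_go_no_slash (cs.length + 1) cs [] [] (by omega) (by simp) (by simp) x hx

theorem pvParts_no_slash (p : String) : ∀ x ∈ pvParts p, ('/' : Char) ∉ x.toList := by
  intro x hx
  unfold pvParts at hx
  have hsep : ("/" : String).toList = ['/'] := rfl
  rw [PySem.Str.split?, PySem.Chars.split?.eq_1] at hx
  simp only [hsep, List.isEmpty_cons, Bool.false_eq_true, if_false, Option.map_some,
    Option.getD_some] at hx
  have hx1 := (List.mem_filter.mp hx).1
  obtain ⟨piece, hpiece, heq⟩ := List.mem_map.mp hx1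
  rw [← heq, String.toList_ofList]
  exact splitOn_no_slash _ piece hpiece

theorem pvNorm_eq (p : String) : pvNorm p = pvKeysOfParts (pvParts p) := by
  have main : ∀ (l : List String),
      (match l.getLast? with
       | some la => l.dropLast.map (fun x => x ++ "/") ++ [la]
       | none => ([] : List String)) = pvKeysOfParts l := by
    intro l
    induction l with
    | nil => simp [pvKeysOfParts]
    | cons a t ih =>
      cases t with
      | nil => simp [pvKeysOfParts]
      | cons b r =>
        rcases e : (b :: r).getLast? with _ | la
        · simp at e
        · rw [show (a :: b :: r).getLast? = some la by simpa [List.getLast?_cons_cons] using e]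
          rw [e] at ih
          simp only [List.dropLast_cons₂, List.map_cons]
          rw [show pvKeysOfParts (a :: b :: r) = (a ++ "/") :: pvKeysOfParts (b :: r) from rfl]
          rw [← ih]
          simp
  simpa [pvNorm] using main (pvParts p)

theorem pvKeysOfParts_ne_nil (a : String) (l : List String) : pvKeysOfParts (a :: l) ≠ [] := by
  cases l <;> simp [pvKeysOfParts]

theorem pvRep_nil : PvRep [] .nil := by
  constructor
  · intro k; simp [pvKeys, pvToPairs]
  · simp [pvKeys, pvToPairs]
  · intro k hk; simp [pvLookup] at hk
  · intro k d hk; simp [pvLookup] at hk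
  · intro k d hk; simp [pvLookup] at hk

theorem pvMem_keys_of_lookup (es : PvEntries) (k : String) (n : PvNode)
    (h : pvLookup es k = some n) : k ∈ pvKeys es := by
  by_contra hm
  rw [← pvLookup_eq_none_iff] at hm
  rw [h] at hm
  exact nomatch hm

theorem pvRep_insert : ∀ (parts : List String) (L : List (List String)) (es : PvEntries),
    (∀ x ∈ parts, ('/' : Char) ∉ x.toList) → pvWfD es → PvRep L es →
    PvRep (L ++ [pvKeysOfParts parts]) (pvInsertPath parts es)
  | [], L, es, _, _, hrep => by
    cases hrep with
    | mk _ _ hiff hnd hfile hne hdir =>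
      have htl : ∀ k, pvTails (L ++ [pvKeysOfParts []]) k = pvTails L k := by
        intro k
        rw [show pvKeysOfParts [] = [] from rfl, pvTails_append]
        simp [pvTails]
      constructor
      · intro k
        rw [show pvKeysOfParts [] = [] from rfl, List.filterMap_append]
        simpa using hiff k
      · exact hnd
      · intro k hk
        rw [htl k]
        exact hfile k hk
      · intro k d hk
        rw [htl k]
        exact hne k d hk
      · intro k d hk
        rw [htl k]
        exact hdir k d hk
  | [l], L, es, hs, _, hrep => by
    cases hrep with
    | mk _ _ hiff hnd hfile hne hdir =>
      have htl : ∀ k, pvTails (L ++ [pvKeysOfParts [l]]) k = pvTails L k := by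
        intro k
        rw [show pvKeysOfParts [l] = [l] from rfl, pvTails_append, pvTails_single]
        simp [pvTails]
      have hhd : (L ++ [pvKeysOfParts [l]]).filterMap List.head? =
          L.filterMap List.head? ++ [l] := by
        rw [show pvKeysOfParts [l] = [l] from rfl]
        simp [List.filterMap_append]
      show PvRep (L ++ [pvKeysOfParts [l]]) (pvSetdefaultFile l es)
      constructor
      · intro k
        rw [hhd, pvKeys_setdefault]
        by_cases hm : l ∈ pvKeys es
        · rw [if_pos hm]
          constructor
          · intro h
            exact List.mem_append_left _ ((hiff k).mp h)
          · intro h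
            rcases List.mem_append.mp h with h | h
            · exact (hiff k).mpr h
            · simp at h; subst h; exact hm
        · rw [if_neg hm]
          constructor
          · intro h
            rcases List.mem_append.mp h with h | h
            · exact List.mem_append_left _ ((hiff k).mp h)
            · exact List.mem_append_right _ h
          · intro h
            rcases List.mem_append.mp h with h | h
            · exact List.mem_append_left _ ((hiff k).mpr h)
            · exact List.mem_append_right _ h
      · rw [pvKeys_setdefault]
        by_cases hm : l ∈ pvKeys es
        · rw [if_pos hm]; exact hnd
        · rw [if_neg hm]
          refine hnd.append (List.nodup_singleton l) ?_
          intro a ha hb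
          exact hm ((List.mem_singleton.mp hb) ▸ ha)
      · intro k hk
        rw [htl k]
        rw [pvLookup_setdefault] at hk
        by_cases hkl : k = l
        · subst hkl
          rw [if_pos rfl] at hk
          rcases e : pvLookup es k with _ | n
          · exact pvTails_eq_nil_of_not_head L k
              (fun hm => ((pvLookup_eq_none_iff k es).mp e) ((hiff k).mpr hm))
          · rw [e] at hk
            simp only [Option.getD_some, Option.some.injEq] at hk
            exact hfile k (by rw [e, hk])
        · rw [if_neg hkl] at hk
          exact hfile k hk
      · intro k d hk
        rw [htl k]
        rw [pvLookup_setdefault] at hk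
        by_cases hkl : k = l
        · subst hkl
          rw [if_pos rfl] at hk
          rcases e : pvLookup es k with _ | n
          · rw [e] at hk; exact nomatch hk
          · rw [e] at hk
            simp only [Option.getD_some, Option.some.injEq] at hk
            exact hne k d (by rw [e, hk])
        · rw [if_neg hkl] at hk
          exact hne k d hk
      · intro k d hk
        rw [htl k]
        rw [pvLookup_setdefault] at hk
        by_cases hkl : k = l
        · subst hkl
          rw [if_pos rfl] at hk
          rcases e : pvLookup es k with _ | n
          · rw [e] at hk; exact nomatch hk
          · rw [e] at hk
            simp only [Option.getD_some, Option.some.injEq] at hk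
            exact hdir k d (by rw [e, hk])
        · rw [if_neg hkl] at hk
          exact hdir k d hk
  | part :: q :: r, L, es, hs, hwf, hrep => by
    cases hrep with
    | mk _ _ hiff hnd hfile hne hdir =>
      have hks : pvKeysOfParts (part :: q :: r) =
          (part ++ "/") :: pvKeysOfParts (q :: r) := rfl
      obtain ⟨w, ws, hws⟩ := List.exists_cons_of_ne_nil (pvKeysOfParts_ne_nil q r)
      have htl : ∀ k, pvTails (L ++ [pvKeysOfParts (part :: q :: r)]) k
          = pvTails L k ++ (if part ++ "/" = k then [pvKeysOfParts (q :: r)] else []) := by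
        intro k
        rw [hks, hws, pvTails_append, pvTails_cons2, ← hws]
        simp [pvTails]
      have hhd : (L ++ [pvKeysOfParts (part :: q :: r)]).filterMap List.head? =
          L.filterMap List.head? ++ [part ++ "/"] := by
        rw [hks]
        simp [List.filterMap_append]
      have hslash : ∀ x ∈ (q :: r), ('/' : Char) ∉ x.toList :=
        fun x hx => hs x (List.mem_cons_of_mem _ hx)
      have hkeyslash : ('/' : Char) ∈ (part ++ "/").toList := by
        rw [String.toList_append]
        simp [show ("/" : String).toList = ['/'] from rfl]
      show PvRep (L ++ [pvKeysOfParts (part :: q :: r)])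
        (pvModifyDir es (part ++ "/") (fun d => pvInsertPath (q :: r) d))
      rcases e : pvLookup es (part ++ "/") with _ | n
      · -- key absent: a fresh subtree is created
        have hkeynot : part ++ "/" ∉ pvKeys es := (pvLookup_eq_none_iff _ es).mp e
        have hsub : PvRep [pvKeysOfParts (q :: r)] (pvInsertPath (q :: r) .nil) := by
          have := pvRep_insert (q :: r) [] .nil hslash pvWfD_nil pvRep_nil
          simpa using this
        constructor
        · intro k
          rw [hhd, pvKeys_modifyDir, if_neg hkeynot]
          constructor
          · intro h
            rcases List.mem_append.mp h with h | h
            · exact List.mem_append_left _ ((hiff k).mp h)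
            · exact List.mem_append_right _ h
          · intro h
            rcases List.mem_append.mp h with h | h
            · exact List.mem_append_left _ ((hiff k).mpr h)
            · exact List.mem_append_right _ h
        · rw [pvKeys_modifyDir, if_neg hkeynot]
          refine hnd.append (List.nodup_singleton _) ?_
          intro a ha hb
          exact hkeynot ((List.mem_singleton.mp hb) ▸ ha)
        · intro k hk
          rw [htl k]
          rw [pvLookup_modifyDir] at hk
          by_cases hkk : k = part ++ "/"
          · subst hkk
            rw [if_pos rfl, e] at hk
            exact nomatch hk
          · rw [if_neg hkk] at hk
            rw [if_neg (fun h => hkk h.symm), List.append_nil]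
            exact hfile k hk
        · intro k d hk
          rw [htl k]
          by_cases hkk : k = part ++ "/"
          · subst hkk
            rw [if_pos rfl]
            simp
          · rw [if_neg (fun h => hkk h.symm), List.append_nil]
            rw [pvLookup_modifyDir, if_neg hkk] at hk
            exact hne k d hk
        · intro k d hk
          rw [htl k]
          rw [pvLookup_modifyDir] at hk
          by_cases hkk : k = part ++ "/"
          · subst hkk
            rw [if_pos rfl, e] at hk
            simp only [Option.some.injEq] at hk
            have hnilt : pvTails L (part ++ "/") = [] :=
              pvTails_eq_nil_of_not_head L _ (fun hm => hkeynot ((hiff _).mpr hm))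
            rw [if_pos rfl, hnilt, List.nil_append]
            have hd' : d = pvInsertPath (q :: r) .nil := by
              injection hk.symm with h'
            rw [hd']
            exact hsub
          · rw [if_neg hkk] at hk
            rw [if_neg (fun h => hkk h.symm), List.append_nil]
            exact hdir k d hk
      · cases n with
        | file =>
          exact absurd ((pvWf_lookup _ _ es hwf e).1 rfl) (fun hcon => hcon hkeyslash)
        | dir d0 =>
          have hkeymem : part ++ "/" ∈ pvKeys es := pvMem_keys_of_lookup es _ _ e
          have hrepd0 : PvRep (pvTails L (part ++ "/")) d0 := hdir _ d0 e
          have hwfd0 : pvWfD d0 := (pvWf_lookup _ _ es hwf e).2 d0 rfl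
          have hsub := pvRep_insert (q :: r) (pvTails L (part ++ "/")) d0 hslash hwfd0 hrepd0
          constructor
          · intro k
            rw [hhd, pvKeys_modifyDir, if_pos hkeymem]
            constructor
            · intro h
              exact List.mem_append_left _ ((hiff k).mp h)
            · intro h
              rcases List.mem_append.mp h with h | h
              · exact (hiff k).mpr h
              · simp at h; subst h; exact hkeymem
          · rw [pvKeys_modifyDir, if_pos hkeymem]
            exact hnd
          · intro k hk
            rw [htl k]
            rw [pvLookup_modifyDir] at hk
            by_cases hkk : k = part ++ "/"
            · subst hkk
              rw [if_pos rfl, e] at hk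
              exact nomatch hk
            · rw [if_neg hkk] at hk
              rw [if_neg (fun h => hkk h.symm), List.append_nil]
              exact hfile k hk
          · intro k d hk
            rw [htl k]
            by_cases hkk : k = part ++ "/"
            · subst hkk
              rw [if_pos rfl]
              simp
            · rw [if_neg (fun h => hkk h.symm), List.append_nil]
              rw [pvLookup_modifyDir, if_neg hkk] at hk
              exact hne k d hk
          · intro k d hk
            rw [htl k]
            rw [pvLookup_modifyDir] at hk
            by_cases hkk : k = part ++ "/"
            · subst hkk
              rw [if_pos rfl, e] at hk
              simp only [Option.some.injEq] at hk
              have hd' : d = pvInsertPath (q :: r) d0 := by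
                injection hk.symm with h'
              rw [if_pos rfl, hd']
              exact hsub
            · rw [if_neg hkk] at hk
              rw [if_neg (fun h => hkk h.symm), List.append_nil]
              exact hdir k d hk

set_option maxHeartbeats 1000000 in
theorem pvRep_build (files : List String) : PvRep (files.map pvNorm) (pvBuildTree files) := by
  have main : ∀ (fs : List String) (L : List (List String)) (es : PvEntries),
      pvWfD es → PvRep L es →
      PvRep (L ++ fs.map pvNorm) (fs.foldl (fun t p => pvInsertPath (pvParts p) t) es) := by
    intro fs
    induction fs with
    | nil => intro L es _ h; simpa using h
    | cons f fs ih =>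
      intro L es hwf hrep
      have h1 := pvRep_insert (pvParts f) L es (pvParts_no_slash f) hwf hrep
      rw [← pvNorm_eq] at h1
      have hwf1 := pvWf_insertPath (pvParts f) es (pvParts_no_slash f) hwf
      have h2 := ih (L ++ [pvNorm f]) (pvInsertPath (pvParts f) es) hwf1 h1
      simp only [List.map_cons, List.foldl_cons]
      rw [show L ++ pvNorm f :: fs.map pvNorm = (L ++ [pvNorm f]) ++ fs.map pvNorm by
        rw [List.append_assoc, List.singleton_append]]
      exact h2
  have h := main files [] .nil pvWfD_nil pvRep_nil
  simpa [pvBuildTree] using h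

theorem pvHeadTail_fst (paths : List (List String)) :
    (paths.filterMap pvHeadTail).map Prod.fst = paths.filterMap List.head? := by
  induction paths with
  | nil => rfl
  | cons q rest ih =>
    cases q with
    | nil => simpa [pvHeadTail] using ih
    | cons x t => simpa [pvHeadTail] using ih

theorem pvBuckets_keys (paths : List (List String)) :
    (pvBuckets paths).keys = PySem.Set.ofList (paths.filterMap List.head?) := by
  unfold pvBuckets
  rw [PySem.Dict.keys_foldl_modify_key (key := fun p : String × List String => p.1)]
  rw [PySem.Dict.keys_empty, pvHeadTail_fst]
  rfl

theorem pvHeads_eq (L : List (List String)) (es : PvEntries) (h : PvRep L es) :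
    pvHeads L = (pvSortedPairs es).map Prod.fst := by
  cases h with
  | mk _ _ hiff hnd hfile hne hdir =>
    have hinj : Function.Injective
        (fun k : String => toLex ((if PySem.Str.endswith k "/" then (0 : Int) else 1), k)) := by
      intro a b hab
      simpa using congrArg (fun x => (ofLex x).2) hab
    have e1 : pvHeads L = PySem.List.sorted (PySem.Set.ofList (L.filterMap List.head?))
        (fun k => toLex ((if PySem.Str.endswith k "/" then (0 : Int) else 1), k)) := by
      unfold pvHeads
      rw [pvBuckets_keys, sorted2_eq_sorted_lex]
    have e2 : pvSortedPairs es = PySem.List.sorted (pvToPairs es)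
        (fun kv : String × PvNode =>
          toLex ((if PySem.Str.endswith kv.1 "/" then (0 : Int) else 1), kv.1)) := by
      unfold pvSortedPairs
      rw [sorted2_eq_sorted_lex]
    have hperm : ((PySem.List.sorted (pvToPairs es)
        (fun kv : String × PvNode =>
          toLex ((if PySem.Str.endswith kv.1 "/" then (0 : Int) else 1), kv.1))).map
          Prod.fst).Perm (pvKeys es) :=
      List.Perm.map Prod.fst (PySem.List.sorted_perm _ _ _)
    have hpwle := PySem.List.sorted_pairwise (pvToPairs es)
        (fun kv : String × PvNode =>
          toLex ((if PySem.Str.endswith kv.1 "/" then (0 : Int) else 1), kv.1))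
    have hpwle2 : List.Pairwise (fun a b : String =>
        toLex ((if PySem.Str.endswith a "/" then (0 : Int) else 1), a)
          ≤ toLex ((if PySem.Str.endswith b "/" then (0 : Int) else 1), b))
        ((PySem.List.sorted (pvToPairs es)
          (fun kv : String × PvNode =>
            toLex ((if PySem.Str.endswith kv.1 "/" then (0 : Int) else 1), kv.1))).map
            Prod.fst) :=
      List.pairwise_map.mpr hpwle
    have hnd2 := (hperm.nodup_iff).mpr hnd
    have hpwlt : List.Pairwise (fun a b : String =>
        toLex ((if PySem.Str.endswith a "/" then (0 : Int) else 1), a)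
          < toLex ((if PySem.Str.endswith b "/" then (0 : Int) else 1), b))
        ((PySem.List.sorted (pvToPairs es)
          (fun kv : String × PvNode =>
            toLex ((if PySem.Str.endswith kv.1 "/" then (0 : Int) else 1), kv.1))).map
            Prod.fst) := by
      refine (hpwle2.and hnd2).imp ?_
      rintro a b ⟨h1, h2⟩
      exact lt_of_le_of_ne h1 (fun hc => h2 (hinj hc))
    have e3 := PySem.List.sorted_eq_of_perm_of_pairwise_lt (pvKeys es) _
      (fun k : String => toLex ((if PySem.Str.endswith k "/" then (0 : Int) else 1), k))
      hperm hpwlt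
    have e4 : PySem.List.sorted (PySem.Set.ofList (L.filterMap List.head?))
        (fun k : String => toLex ((if PySem.Str.endswith k "/" then (0 : Int) else 1), k))
        = PySem.List.sorted (pvKeys es)
          (fun k : String => toLex ((if PySem.Str.endswith k "/" then (0 : Int) else 1), k)) := by
      apply PySem.List.sorted_eq_sorted_of_perm _ _ _ hinj
      rw [List.perm_ext_iff_of_nodup (PySem.Set.nodup_ofList _) hnd]
      intro a
      rw [PySem.Set.mem_ofList]
      exact (hiff a).symm
    rw [e1, e4, e3, ← e2]

theorem pvWalkA_nil (pfx : String) : pvWalkA [] pfx = [] := by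
  rw [pvWalkA.eq_def]

theorem pvEmit_nil (L : List (List String)) (pfx : String) : pvEmit L [] pfx = [] := by
  rw [pvEmit.eq_def]

theorem pvMapFst_isEmpty (rest : List (String × PvNode)) :
    (rest.map Prod.fst).isEmpty = rest.isEmpty := by
  cases rest <;> rfl

theorem pvWalk_eq : ∀ (n : Nat) (es : PvEntries), pvSizeE es ≤ n →
    ∀ (L : List (List String)) (pfx : String), PvRep L es →
    pvWalkA (pvSortedPairs es) pfx = pvEmit L (pvHeads L) pfx := by
  intro n
  induction n with
  | zero =>
    intro es hsz L pfx hrep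
    cases es with
    | nil =>
      rw [pvHeads_eq _ _ hrep]
      rw [show pvSortedPairs .nil = [] from rfl]
      simp [pvWalkA_nil, pvEmit_nil]
    | cons k nn e =>
      exact absurd hsz (by simp [pvSizeE, pvSizeN])
  | succ n ih =>
    intro es hsz L pfx hrep
    have hrep' := hrep
    cases hrep with
    | mk _ _ hiff hnd hfile hne hdir =>
      rw [pvHeads_eq _ _ hrep']
      have hsubmem : ∀ kn ∈ pvSortedPairs es, kn ∈ pvToPairs es := fun kn hkn =>
        ((PySem.List.sorted2_perm _ _ _ _).mem_iff).mp hkn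
      suffices haux : ∀ ps : List (String × PvNode), (∀ kn ∈ ps, kn ∈ pvToPairs es) →
          pvWalkA ps pfx = pvEmit L (ps.map Prod.fst) pfx from haux _ hsubmem
      intro ps
      induction ps with
      | nil =>
        intro _
        simp [pvWalkA_nil, pvEmit_nil]
      | cons kn rest ihps =>
        intro hmem
        obtain ⟨k, c⟩ := kn
        have hlk : pvLookup es k = some c :=
          pvLookup_of_mem_pairs k c es (hmem _ (List.mem_cons_self ..)) hnd
        have hrest : ∀ kn ∈ rest, kn ∈ pvToPairs es :=
          fun kn hk => hmem kn (List.mem_cons_of_mem _ hk)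
        cases c with
        | file =>
          have htl0 : pvTails L k = [] := hfile k hlk
          rw [List.map_cons, pvWalkA.eq_def, pvEmit.eq_def]
          dsimp only
          rw [pvMapFst_isEmpty, pvTailsB_eq, htl0, ihps hrest]
          simp
        | dir d =>
          have htlne := hne k d hlk
          have hrepd := hdir k d hlk
          have hszd : pvSizeE d ≤ n := by
            have := pvSize_lookup_dir k d es hlk
            omega
          have hrec := ih d hszd (pvTails L k)
            (pfx ++ (if rest.isEmpty then "    " else "│   ")) hrepd
          rw [pvHeads_eq _ _ hrepd] at hrec
          rw [List.map_cons, pvWalkA.eq_def, pvEmit.eq_def]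
          dsimp only
          rw [pvMapFst_isEmpty, pvTailsB_eq, dif_neg (by simpa using htlne)]
          rw [ihps hrest, hrec, pvHeads_eq _ _ hrepd]

-- ===== VERDICT (by name: the statement is the Claim_ definition above) =====
theorem render_file_tree_markdown_spec : Claim_equal_render_file_tree_markdown := by
  unfold Claim_equal_render_file_tree_markdown
  intro files _ _
  unfold Spec_render_file_tree_markdown
  unfold render_file_tree_markdown render_file_tree_markdown_alt
  have hrep := pvRep_build files
  have h := pvWalk_eq (pvSizeE (pvBuildTree files)) (pvBuildTree files) le_rfl
    (files.map pvNorm) "" hrep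
  simp only [h]
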